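-- pv_equiv track=rewrite | github.com/IronLanguages/ironclad | tools/utils/ictypes.py | _get_equivalent_key_mapping
-- ===== SOURCE A (Python) =====
-- def _invert_dict(dict_):
--     bins = {}
--     for key, value in dict_.items():
--         bin = bins.setdefault(value, [])
--         bin.append(key)
--     return bins
--
-- def _choose_best_name(equivalents, priority):
--     if len(equivalents) > 1:
--         for good_choice in priority:
--             if good_choice in equivalents:
--                 return good_choice
--     return sorted(equivalents)[0]
--
-- def _get_equivalent_key_mapping(d, priority=''):
--     equivalent_keys = _invert_dict(d).values()
--     result = {}
--     for keys in equivalent_keys: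
--         best = _choose_best_name(keys, priority.split())
--         for key in keys:
--             result[key] = best
--     return result
-- ===== SOURCE B (Python) =====
-- def _get_equivalent_key_mapping(d, priority=''):
--     # group keys by value
--     bins = {}
--     for key, value in d.items():
--         bins.setdefault(value, []).append(key)
--     # one scan of the priority words against the dict: first word naming each value
--     pick = {}
--     for word in priority.split():
--         if word in d and d[word] not in pick:
--             pick[d[word]] = word
--     # emit bin by bin with a table lookup instead of a per-bin scan of the priority list
--     result = {}
--     for value, keys in bins.items():
--         if len(keys) > 1 and value in pick:
--             best = pick[value]
--         else:
--             best = min(keys)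
--         for key in keys:
--             result[key] = best
--     return result
-- ===== Notes on version B (the rewrite author's own statement) =====
-- stated objective: faster
-- what changed: A rescans the whole priority word list with linear membership tests over the bin for every bin; B instead makes one pass over the priority words against the dict to build a value-to-word table, then emits each bin with a table lookup, and takes min of a bin instead of sorting it and taking the head.
import Mathlib
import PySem

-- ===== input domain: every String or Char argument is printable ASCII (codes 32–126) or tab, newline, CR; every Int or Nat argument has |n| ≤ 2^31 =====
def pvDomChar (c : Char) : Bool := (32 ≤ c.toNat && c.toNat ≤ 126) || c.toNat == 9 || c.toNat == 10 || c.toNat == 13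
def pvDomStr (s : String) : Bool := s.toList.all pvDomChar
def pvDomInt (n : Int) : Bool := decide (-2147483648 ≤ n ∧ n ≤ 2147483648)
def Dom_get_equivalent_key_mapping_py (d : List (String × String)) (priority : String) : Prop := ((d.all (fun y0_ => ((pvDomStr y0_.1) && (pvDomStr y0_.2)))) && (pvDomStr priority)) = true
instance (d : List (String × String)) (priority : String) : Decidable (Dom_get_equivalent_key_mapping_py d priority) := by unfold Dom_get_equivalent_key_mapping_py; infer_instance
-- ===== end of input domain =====

-- B replaces A's per-bin rescan of the priority words (with linear 'in keys' tests) by one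
-- value→word table built in a single pass over the priority words, plus min(keys) for sorted(keys)[0].

-- ===== PORT A =====
-- shared grouping loop: both Pythons contain literally 'bins.setdefault(value, []).append(key)'
def pvGroupByValue (items : List (String × String)) : PySem.Dict String (List String) :=
  items.foldl (fun bins kv => bins.modify kv.2 [] (fun bin => bin ++ [kv.1])) PySem.Dict.empty

-- the 'for good_choice in priority: if good_choice in equivalents: return good_choice' loop
def pvChooseLoop (priority : List String) (equivalents : List String) : Option String :=
  match priority with
  | [] => none
  | w :: ws => if equivalents.contains w then some w else pvChooseLoop ws equivalents

-- _choose_best_name; sorted(equivalents)[0] is safe in A (bins are nonempty), ported as headD ""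
def pvChooseBest (equivalents : List String) (priority : List String) : String :=
  if equivalents.length > 1 then
    match pvChooseLoop priority equivalents with
    | some w => w
    | none => (PySem.List.sorted equivalents (fun x => x)).headD ""
  else (PySem.List.sorted equivalents (fun x => x)).headD ""

def get_equivalent_key_mapping_py (d : List (String × String)) (priority : String) : List (String × String) :=
  let dict := PySem.Dict.ofList d
  let equivalent_keys := (pvGroupByValue dict.items).values
  (equivalent_keys.foldl (fun result keys =>
      let best := pvChooseBest keys (PySem.Str.split₀ priority)
      keys.foldl (fun result key => result.insert key best) result)
    PySem.Dict.empty).items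

-- ===== PORT B =====
-- 'if word in d and d[word] not in pick: pick[d[word]] = word'
def pvPickStep (dict : PySem.Dict String String) (pick : PySem.Dict String String) (word : String) : PySem.Dict String String :=
  match dict.get? word with
  | some v => if pick.contains v then pick else pick.insert v word
  | none => pick

def get_equivalent_key_mapping_py_alt (d : List (String × String)) (priority : String) : List (String × String) :=
  let dict := PySem.Dict.ofList d
  let bins := pvGroupByValue dict.items
  let pick := (PySem.Str.split₀ priority).foldl (pvPickStep dict) PySem.Dict.empty
  (bins.items.foldl (fun result vk =>
      let best := if decide (vk.2.length > 1) && pick.contains vk.1 then pick.getD vk.1 ""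
                  else PySem.List.minD vk.2 (fun x => x) ""
      vk.2.foldl (fun result key => result.insert key best) result)
    PySem.Dict.empty).items

-- ===== PRECONDITION & SPEC =====
def Spec_get_equivalent_key_mapping_py (d : List (String × String)) (priority : String) (out : List (String × String)) : Prop := out = get_equivalent_key_mapping_py_alt d priority
instance (d : List (String × String)) (priority : String) (out : List (String × String)) : Decidable (Spec_get_equivalent_key_mapping_py d priority out) := by unfold Spec_get_equivalent_key_mapping_py; infer_instance

-- ===== CLAIM (what is proved, stated in full; the proofs are below) =====
def Claim_equal_get_equivalent_key_mapping_py : Prop := ∀ (d : List (String × String)) (priority : String), Dom_get_equivalent_key_mapping_py d priority → Spec_get_equivalent_key_mapping_py d priority (get_equivalent_key_mapping_py d priority)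

-- ===== LEMMAS AND PROOFS =====

lemma pvGroup_getD (items : List (String × String)) (v : String) :
    (pvGroupByValue items).getD v [] = (items.filter (fun kv => kv.2 == v)).map (fun kv => kv.1) := by
  have h := PySem.Dict.getD_foldl_modify_append (items.map (fun kv => (kv.2, kv.1)))
    (PySem.Dict.empty (κ := String) (ν := List String)) v
  rw [List.foldl_map] at h
  simpa [pvGroupByValue, PySem.Dict.getD_empty, List.filter_map, List.map_map, Function.comp] using h

lemma pvGroup_keys (items : List (String × String)) :
    (pvGroupByValue items).keys = PySem.Set.ofList (items.map (fun kv => kv.2)) := by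
  have h := PySem.Dict.keys_foldl_modify_key items (fun kv => kv.2) ([] : List String)
    (fun _ kv => (fun bin => bin ++ [kv.1])) PySem.Dict.empty
  simpa [pvGroupByValue, PySem.Dict.keys_empty, PySem.Set.update_nil_left] using h

lemma pvGroup_nodup_keys (items : List (String × String)) :
    (pvGroupByValue items).keys.Nodup := by
  have h := PySem.Dict.nodup_keys_foldl_modify_key items (fun kv => kv.2) ([] : List String)
    (fun _ kv => (fun bin => bin ++ [kv.1])) PySem.Dict.empty
    (by simp [PySem.Dict.keys_empty])
  simpa [pvGroupByValue] using h

lemma pvPick_get? (dict : PySem.Dict String String) (words : List String)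
    (acc : PySem.Dict String String) (v : String) :
    (words.foldl (pvPickStep dict) acc).get? v
      = (acc.get? v).or (words.find? (fun w => dict.get? w == some v)) := by
  induction words generalizing acc with
  | nil => simp
  | cons w ws ih =>
    simp only [List.foldl_cons]
    rw [ih]
    cases hw : dict.get? w with
    | none =>
      simp [pvPickStep, hw]
    | some u =>
      by_cases huv : u = v
      · subst huv
        by_cases hc : acc.contains u = true
        · rw [PySem.Dict.contains_eq_isSome_get?] at hc
          cases hga : acc.get? u with
          | none => rw [hga] at hc; simp at hc
          | some w0 =>
            simp [pvPickStep, hw, hga, PySem.Dict.contains_eq_isSome_get?]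
        · have hc' : acc.contains u = false := by simpa using hc
          have hgn : acc.get? u = none := (PySem.Dict.get?_eq_none_iff_contains acc u).mpr hc'
          simp [pvPickStep, hw, hc', PySem.Dict.get?_insert_self, hgn]
      · have hne : (u == v) = false := by simpa using huv
        by_cases hc : acc.contains u = true
        · simp [pvPickStep, hw, hc, hne]
        · have hc' : acc.contains u = false := by simpa using hc
          have hgi : ((acc.insert u w).get? v) = acc.get? v :=
            PySem.Dict.get?_insert_of_ne acc w (fun h => huv h.symm)
          simp [pvPickStep, hw, hc', hne, hgi]

lemma pvChooseLoop_eq_find? (ws keys : List String) :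
    pvChooseLoop ws keys = ws.find? (fun w => keys.contains w) := by
  induction ws with
  | nil => rfl
  | cons w ws ih =>
    by_cases h : w ∈ keys <;> simp [pvChooseLoop, h, ih]

lemma pvKeys_contains (dict : PySem.Dict String String) (hn : dict.keys.Nodup) (v w : String) :
    ((dict.items.filter (fun kv => kv.2 == v)).map (fun kv => kv.1)).contains w
      = (dict.get? w == some v) := by
  have hmem : (w ∈ (dict.items.filter (fun kv => kv.2 == v)).map (fun kv => kv.1))
      ↔ dict.get? w = some v := by
    rw [PySem.Dict.get?_eq_some_iff_mem_items dict w v hn]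
    constructor
    · rintro h
      simp only [List.mem_map, List.mem_filter, beq_iff_eq] at h
      obtain ⟨kv, ⟨hkv, h2⟩, h1⟩ := h
      have : kv = (w, v) := by cases kv; simp_all
      exact this ▸ hkv
    · intro h
      exact List.mem_map.mpr ⟨(w, v), List.mem_filter.mpr ⟨h, by simp⟩, rfl⟩
  rw [Bool.eq_iff_iff]
  simp [hmem]

lemma pvSorted_headD_eq_minD (keys : List String) (h : keys ≠ []) :
    ((PySem.List.sorted keys (fun x => x)).headD "") = PySem.List.minD keys (fun x => x) "" := by
  cases hs : PySem.List.sorted keys (fun x => x) with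
  | nil =>
    exact absurd (List.Perm.nil_eq ((hs ▸ PySem.List.sorted_perm keys (fun x => x) false))).symm h
  | cons a t =>
    have hperm := PySem.List.sorted_perm keys (fun x => x) false
    have hamem : a ∈ keys := hperm.mem_iff.mp (by simp [hs])
    have hpw := PySem.List.sorted_pairwise keys (fun x => x)
    rw [hs, List.pairwise_cons] at hpw
    have hmin : ∀ x ∈ keys, a ≤ x := by
      intro x hx
      have hx' := hperm.mem_iff.mpr hx
      rw [hs] at hx'
      rcases List.mem_cons.mp hx' with rfl | hxt
      · exact le_refl _
      · exact hpw.1 x hxt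
    cases hm : PySem.List.min? keys (fun x => x) with
    | none => exact absurd ((PySem.List.min?_eq_none_iff keys (fun x => x)).mp hm) h
    | some m =>
      have hmmem : m ∈ keys := PySem.List.min?_mem hm
      have hmd : PySem.List.minD keys (fun x => x) "" = m := by
        rw [PySem.List.minD, hm]; rfl
      rw [hmd]
      exact le_antisymm (hmin m hmmem) (PySem.List.min?_isMin hm a hamem)

lemma pvBest_eq (dict : PySem.Dict String String) (hn : dict.keys.Nodup) (pwords : List String)
    (v : String) (hv : v ∈ dict.items.map (fun kv => kv.2)) :
    pvChooseBest ((dict.items.filter (fun kv => kv.2 == v)).map (fun kv => kv.1)) pwords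
      = (if decide (((dict.items.filter (fun kv => kv.2 == v)).map (fun kv => kv.1)).length > 1)
            && (pwords.foldl (pvPickStep dict) PySem.Dict.empty).contains v
         then (pwords.foldl (pvPickStep dict) PySem.Dict.empty).getD v ""
         else PySem.List.minD ((dict.items.filter (fun kv => kv.2 == v)).map (fun kv => kv.1)) (fun x => x) "") := by
  set keys := (dict.items.filter (fun kv => kv.2 == v)).map (fun kv => kv.1) with hk
  set pick := pwords.foldl (pvPickStep dict) PySem.Dict.empty with hp
  have hne : keys ≠ [] := by
    obtain ⟨kv, hkv, h2⟩ := List.mem_map.mp hv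
    have : kv.1 ∈ keys :=
      List.mem_map.mpr ⟨kv, List.mem_filter.mpr ⟨hkv, by simp [h2]⟩, rfl⟩
    exact List.ne_nil_of_mem this
  have hpget : pick.get? v = pwords.find? (fun w => dict.get? w == some v) := by
    rw [hp, pvPick_get?]
    simp
  have hsm := pvSorted_headD_eq_minD keys hne
  unfold pvChooseBest
  by_cases hlen : keys.length > 1
  · rw [if_pos hlen, pvChooseLoop_eq_find?]
    have hfind : (fun w => keys.contains w) = (fun w => dict.get? w == some v) :=
      funext (fun w => pvKeys_contains dict hn v w)
    rw [hfind]
    cases hf : pwords.find? (fun w => dict.get? w == some v) with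
    | some w =>
      have hcv : pick.contains v = true := by
        rw [PySem.Dict.contains_eq_isSome_get?, hpget, hf]; rfl
      simp [hf, hcv, hlen, PySem.Dict.getD_eq_get?_getD, hpget]
    | none =>
      have hcv : pick.contains v = false := by
        rw [PySem.Dict.contains_eq_isSome_get?, hpget, hf]; rfl
      simp [hcv]
      simpa using hsm
  · rw [if_neg hlen]
    simp [hlen]
    simpa using hsm

-- ===== VERDICT (by name: the statement is the Claim_ definition above) =====
theorem get_equivalent_key_mapping_py_spec : Claim_equal_get_equivalent_key_mapping_py := by
  intro d priority _
  unfold Spec_get_equivalent_key_mapping_py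
  unfold get_equivalent_key_mapping_py get_equivalent_key_mapping_py_alt
  set dict := PySem.Dict.ofList d with hdict
  set bins := pvGroupByValue dict.items with hbins
  set pwords := PySem.Str.split₀ priority with hpw
  simp only [PySem.Dict.values]
  rw [List.foldl_map]
  refine congrArg PySem.Dict.items (PySem.List.foldl_congr_mem _ _ _ _ ?_)
  intro acc vk hvk
  have hnd := pvGroup_nodup_keys dict.items
  rw [PySem.Dict.items_eq_map_keys bins hnd []] at hvk
  obtain ⟨v, hv, rfl⟩ := List.mem_map.mp hvk
  have hvval : v ∈ dict.items.map (fun kv => kv.2) := by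
    rw [pvGroup_keys] at hv
    exact (PySem.Set.mem_ofList _ _).mp hv
  have hkeys : bins.getD v [] = (dict.items.filter (fun kv => kv.2 == v)).map (fun kv => kv.1) :=
    pvGroup_getD dict.items v
  refine congrArg (fun b => (bins.getD v []).foldl (fun result key => result.insert key b) acc) ?_
  rw [hkeys]
  exact pvBest_eq dict (PySem.Dict.nodup_keys_ofList d) pwords v hvval
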